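-- pv_equiv track=rewrite | github.com/mjlovesz/sync-ait | ait/components/analyze/app/utils/thread_helper.py | alloc_configs_for_subprocess
-- ===== SOURCE A (Python) =====
-- def alloc_configs_for_subprocess(parallel, configs_num):
--     num_process = [int(configs_num // parallel) + 1 for _ in range(configs_num % parallel)]
--     num_process = num_process + [int(configs_num // parallel) for _ in range(parallel - configs_num % parallel)]
--     idx = 0
--     process_idx = [0]
--     for num in num_process:
--         process_idx.append(idx + num)
--         idx += num
--     return process_idx
-- ===== SOURCE B (Python) =====
-- def alloc_configs_for_subprocess(parallel, configs_num):
--     q = configs_num // parallel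
--     r = configs_num % parallel
--     return [0] + [i * q + min(i, r) for i in range(1, parallel + 1)]
-- ===== Notes on version B (the rewrite author's own statement) =====
-- stated objective: simpler
-- what changed: Replaces building the per-chunk size list and accumulating a running prefix sum with a direct closed-form boundary formula [0] + [i*q + min(i,r)], computed in one comprehension.
import Mathlib
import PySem

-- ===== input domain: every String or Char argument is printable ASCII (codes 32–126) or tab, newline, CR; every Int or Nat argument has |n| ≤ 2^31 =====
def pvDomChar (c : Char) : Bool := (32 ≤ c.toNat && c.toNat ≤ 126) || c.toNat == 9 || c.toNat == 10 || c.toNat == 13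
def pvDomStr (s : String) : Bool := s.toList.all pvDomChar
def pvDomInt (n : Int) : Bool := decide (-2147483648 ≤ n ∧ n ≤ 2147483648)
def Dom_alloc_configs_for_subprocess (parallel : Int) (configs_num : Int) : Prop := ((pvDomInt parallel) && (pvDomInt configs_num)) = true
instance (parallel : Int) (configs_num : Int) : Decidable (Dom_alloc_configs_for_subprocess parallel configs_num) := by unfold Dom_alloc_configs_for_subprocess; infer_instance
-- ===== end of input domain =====

-- B replaces A's size-list-plus-running-prefix-sum with the direct closed-form boundary
-- formula [0] ++ [i*q + min(i,r) for i in 1..parallel] (objective: simpler).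

-- ===== PORT A =====
def alloc_configs_for_subprocess (parallel : Int) (configs_num : Int) : List Int :=
  let num_process :=
    (PySem.List.pyRange 0 (PySem.Int.mod configs_num parallel) 1).map
      (fun _ => PySem.Int.floordiv configs_num parallel + 1) ++
    (PySem.List.pyRange 0 (parallel - PySem.Int.mod configs_num parallel) 1).map
      (fun _ => PySem.Int.floordiv configs_num parallel)
  let st := num_process.foldl
      (fun (st : Int × List Int) num => (st.1 + num, st.2 ++ [st.1 + num])) (0, [0])
  st.2

-- ===== PORT B =====
def alloc_configs_for_subprocess_alt (parallel : Int) (configs_num : Int) : List Int :=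
  let q := PySem.Int.floordiv configs_num parallel
  let r := PySem.Int.mod configs_num parallel
  0 :: (PySem.List.pyRange 1 (parallel + 1) 1).map (fun i => i * q + min i r)

-- ===== PRECONDITION & SPEC =====
-- Pre_ excludes exactly parallel = 0, where Python A raises ZeroDivisionError.
def Pre_alloc_configs_for_subprocess (parallel : Int) (configs_num : Int) : Prop := parallel ≠ 0
instance (parallel : Int) (configs_num : Int) : Decidable (Pre_alloc_configs_for_subprocess parallel configs_num) := by unfold Pre_alloc_configs_for_subprocess; infer_instance
def pvWitness_alloc_configs_for_subprocess : Int × Int := (3, 7)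

def Spec_alloc_configs_for_subprocess (parallel : Int) (configs_num : Int) (out : List Int) : Prop := out = alloc_configs_for_subprocess_alt parallel configs_num
instance (parallel : Int) (configs_num : Int) (out : List Int) : Decidable (Spec_alloc_configs_for_subprocess parallel configs_num out) := by unfold Spec_alloc_configs_for_subprocess; infer_instance

-- ===== CLAIM (what is proved, stated in full; the proofs are below) =====
def Claim_equal_alloc_configs_for_subprocess : Prop := ∀ (parallel : Int) (configs_num : Int), Dom_alloc_configs_for_subprocess parallel configs_num → Pre_alloc_configs_for_subprocess parallel configs_num → Spec_alloc_configs_for_subprocess parallel configs_num (alloc_configs_for_subprocess parallel configs_num)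

-- ===== LEMMAS AND PROOFS =====

/-- Prefix sums of a list starting at `idx` (values only, not including `idx`). -/
def pvPsums (idx : Int) : List Int → List Int
  | [] => []
  | x :: xs => (idx + x) :: pvPsums (idx + x) xs

theorem pvFoldl_psums (l : List Int) (idx : Int) (acc : List Int) :
    (l.foldl (fun (st : Int × List Int) num => (st.1 + num, st.2 ++ [st.1 + num])) (idx, acc)).2
      = acc ++ pvPsums idx l := by
  induction l generalizing idx acc with
  | nil => simp [pvPsums]
  | cons x xs ih => simp [List.foldl, pvPsums, ih]

theorem pvPsums_append (l1 l2 : List Int) (idx : Int) :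
    pvPsums idx (l1 ++ l2) = pvPsums idx l1 ++ pvPsums (idx + l1.sum) l2 := by
  induction l1 generalizing idx with
  | nil => simp [pvPsums]
  | cons x xs ih => simp [pvPsums, ih, add_assoc]

theorem pvPsums_replicate (m : Nat) (c idx : Int) :
    pvPsums idx (List.replicate m c)
      = (List.range m).map (fun k : Nat => idx + ((k : Int) + 1) * c) := by
  induction m with
  | zero => simp [pvPsums]
  | succ n ih =>
    rw [List.replicate_succ', pvPsums_append, ih, List.range_succ, List.map_append]
    simp [pvPsums]
    ring

theorem pvMap_const_pyRange (n : Int) (c : Int) :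
    (PySem.List.pyRange 0 n 1).map (fun _ => c) = List.replicate n.toNat c := by
  rw [PySem.List.pyRange_one]
  simp [List.map_map, List.eq_replicate_iff]

theorem alloc_eq (parallel configs_num : Int) (hne : parallel ≠ 0) :
    alloc_configs_for_subprocess parallel configs_num
      = alloc_configs_for_subprocess_alt parallel configs_num := by
  unfold alloc_configs_for_subprocess alloc_configs_for_subprocess_alt
  set q := PySem.Int.floordiv configs_num parallel with hq
  set r := PySem.Int.mod configs_num parallel with hr
  rcases lt_or_gt_of_ne hne with hneg | hpos
  · -- parallel < 0 : all ranges are empty, both sides are [0]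
    obtain ⟨h1, h2⟩ := PySem.Int.mod_neg_bounds (a := configs_num) hneg
    rw [PySem.List.pyRange_one_eq_nil (by omega), PySem.List.pyRange_one_eq_nil (by omega),
        PySem.List.pyRange_one_eq_nil (by omega)]
    simp
  · -- parallel > 0
    have hr0 : 0 ≤ r := PySem.Int.mod_nonneg _ hpos
    have hrlt : r < parallel := PySem.Int.mod_lt _ hpos
    simp only [pvMap_const_pyRange, pvFoldl_psums, pvPsums_append, pvPsums_replicate,
      List.sum_replicate]
    have hrn : ((r.toNat : Int)) = r := Int.toNat_of_nonneg hr0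
    have hmn : (((parallel - r).toNat : Int)) = parallel - r := Int.toNat_of_nonneg (by omega)
    rw [PySem.List.pyRange_one]
    have hsplit : ((parallel + 1 - 1).toNat) = r.toNat + (parallel - r).toNat := by omega
    rw [hsplit, List.range_add, List.map_append, List.map_append]
    simp only [List.map_map]
    simp only [List.singleton_append]
    congr 1
    congr 1
    · apply List.map_congr_left
      intro k hk
      rw [List.mem_range] at hk
      have h1 : (1 : Int) + (k : Int) ≤ r := by omega
      simp only [Function.comp, min_eq_left h1]
      ring
    · apply List.map_congr_left
      intro k hk
      have h2 : r ≤ 1 + ((r.toNat + k : Nat) : Int) := by push_cast; omega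
      simp only [Function.comp]
      rw [min_eq_right h2, nsmul_eq_mul]
      push_cast
      rw [hrn]
      ring

-- ===== VERDICT (by name: the statement is the Claim_ definition above) =====
theorem alloc_configs_for_subprocess_spec : Claim_equal_alloc_configs_for_subprocess := by
  intro parallel configs_num _ hpre
  unfold Spec_alloc_configs_for_subprocess
  exact alloc_eq parallel configs_num hpre
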